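-- pv_equiv track=rewrite | github.com/13acts/AoC-2023 | 14.py | solve_line
-- ===== SOURCE A (Python) =====
-- from collections import defaultdict
--
-- def solve_line(line):
--     n = len(line)
--     note = defaultdict(int)
--     weight = 0
--     i_patch = None
--     o_count = 0
--     for i, c in enumerate('#'+line+'#'):
--         if c == '#':
--             if i_patch is None:
--                 i_patch = i
--             else:
--                 note[i_patch] = o_count
--                 weight += sum(x for x in range(n-i_patch, n-i_patch-o_count, -1))
--                 i_patch = i
--                 o_count = 0
--         elif c == 'O':
--                 o_count += 1
--     # return dict(note)
--     return weight
-- ===== SOURCE B (Python) =====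
-- def solve_line(line):
--     n = len(line)
--     free = 0
--     weight = 0
--     for j, c in enumerate(line):
--         if c == '#':
--             free = j + 1
--         elif c == 'O':
--             weight += n - free
--             free += 1
--     return weight
-- ===== Notes on version B (the rewrite author's own statement) =====
-- stated objective: simpler
-- what changed: B drops A's boundary sentinels, defaultdict bookkeeping and the per-segment inner range-sum: it keeps a single next-free-slot index and adds each rock's load n-free the moment the rock is seen, in one plain pass.
import Mathlib
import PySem

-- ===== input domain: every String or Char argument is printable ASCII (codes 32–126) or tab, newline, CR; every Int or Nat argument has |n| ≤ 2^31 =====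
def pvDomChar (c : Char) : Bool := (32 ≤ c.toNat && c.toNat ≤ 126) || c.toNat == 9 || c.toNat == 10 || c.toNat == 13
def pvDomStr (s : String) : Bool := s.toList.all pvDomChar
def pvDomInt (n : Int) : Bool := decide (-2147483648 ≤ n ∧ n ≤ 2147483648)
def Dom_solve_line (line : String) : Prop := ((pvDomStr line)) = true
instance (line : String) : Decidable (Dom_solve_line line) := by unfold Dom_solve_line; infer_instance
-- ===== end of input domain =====

-- B replaces A's sentinel-padded per-segment range-summing with a single pass that adds
-- each rock's load n - free directly (objective: simpler).

-- ===== PORT A =====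
-- loop body of A: state (note, weight, i_patch, o_count), input (i, c)
def stepA (n : Int) (st : PySem.Dict Int Int × Int × Option Int × Int)
    (ic : Int × Char) : PySem.Dict Int Int × Int × Option Int × Int :=
  let (note, weight, i_patch, o_count) := st
  if ic.2 = '#' then
    match i_patch with
    | none => (note, weight, some ic.1, o_count)
    | some p =>
      (note.insert p o_count,
       weight + (PySem.List.pyRange (n - p) (n - p - o_count) (-1)).sum,
       some ic.1, 0)
  else if ic.2 = 'O' then (note, weight, i_patch, o_count + 1)
  else st

def solve_line (line : String) : Int :=
  ((PySem.List.enumerate (("#" ++ line ++ "#").toList) 0).foldl (stepA (PySem.Str.len line))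
    (PySem.Dict.empty, 0, none, 0)).2.1

-- ===== PORT B =====
-- loop body of B: state (free, weight), input (j, c)
def stepB (n : Int) (st : Int × Int) (jc : Int × Char) : Int × Int :=
  if jc.2 = '#' then (jc.1 + 1, st.2)
  else if jc.2 = 'O' then (st.1 + 1, st.2 + (n - st.1))
  else st

def solve_line_alt (line : String) : Int :=
  ((PySem.List.enumerate line.toList 0).foldl (stepB (PySem.Str.len line)) (0, 0)).2

-- ===== PRECONDITION & SPEC =====
def Spec_solve_line (line : String) (out : Int) : Prop := out = solve_line_alt line
instance (line : String) (out : Int) : Decidable (Spec_solve_line line out) := by unfold Spec_solve_line; infer_instance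

-- ===== CLAIM (what is proved, stated in full; the proofs are below) =====
def Claim_equal_solve_line : Prop := ∀ (line : String), Dom_solve_line line → Spec_solve_line line (solve_line line)

-- ===== LEMMAS AND PROOFS =====

-- the load A adds when closing an empty segment is 0
lemma segsum_self (a : Int) : (PySem.List.pyRange a a (-1)).sum = 0 := by
  rw [PySem.List.pyRange_neg_one_eq_nil le_rfl]; rfl

-- one more rock in the segment adds a - k to A's closing sum
lemma segsum_succ (a k : Int) (hk : 0 ≤ k) :
    (PySem.List.pyRange a (a - (k + 1)) (-1)).sum
      = (PySem.List.pyRange a (a - k) (-1)).sum + (a - k) := by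
  rw [PySem.List.pyRange_neg_one, PySem.List.pyRange_neg_one]
  have h1 : (a - (a - (k + 1))).toNat = (a - (a - k)).toNat + 1 := by omega
  have h2 : ((a - (a - k)).toNat : Int) = k := by omega
  rw [h1, List.range_succ]
  simp
  omega

-- loop invariant: once A has consumed its leading sentinel '#', with segment start p and
-- o_count k, B's free slot equals p + k and B's weight leads A's by the pending segment sum.
lemma loop_eq (n : Int) (cs : List Char) :
    ∀ (s p k wA free wB : Int) (note : PySem.Dict Int Int), 0 ≤ k → free = p + k →
      wB = wA + (PySem.List.pyRange (n - p) (n - p - k) (-1)).sum →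
      ((PySem.List.enumerate (cs ++ ['#']) s).foldl (stepA n) (note, wA, some p, k)).2.1
        = ((PySem.List.enumerate cs (s - 1)).foldl (stepB n) (free, wB)).2 := by
  induction cs with
  | nil =>
    intro s p k wA free wB note hk hf hw
    simp [PySem.List.enumerate_cons, PySem.List.enumerate_nil, stepA]
    omega
  | cons c cs ih =>
    intro s p k wA free wB note hk hf hw
    simp only [List.cons_append, PySem.List.enumerate_cons, List.foldl_cons]
    by_cases h1 : c = '#'
    · simp only [stepA, stepB, h1, if_true, sub_add_cancel]
      have := ih (s + 1) s 0 (wA + (PySem.List.pyRange (n - p) (n - p - k) (-1)).sum)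
        s wB (note.insert p k) le_rfl (by omega)
        (by rw [hw, show n - s - 0 = n - s by ring, segsum_self]; ring)
      rw [show s + 1 - 1 = s by ring] at this
      exact this
    · by_cases h2 : c = 'O'
      · simp only [stepA, stepB, h2, show ¬('O' : Char) = '#' from by decide, if_false,
          if_true, sub_add_cancel]
        have := ih (s + 1) p (k + 1) wA (free + 1) (wB + (n - free)) note (by omega)
          (by omega) (by rw [hw, hf, segsum_succ (n - p) k hk]; ring)
        rw [show s + 1 - 1 = s by ring] at this
        exact this
      · simp only [stepA, stepB, h1, h2, if_false, sub_add_cancel]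
        have := ih (s + 1) p k wA free wB note hk hf hw
        rw [show s + 1 - 1 = s by ring] at this
        exact this

-- ===== VERDICT (by name: the statement is the Claim_ definition above) =====
theorem solve_line_spec : Claim_equal_solve_line := by
  intro line _
  unfold Spec_solve_line solve_line solve_line_alt
  have hsplit : ("#" ++ line ++ "#").toList = '#' :: (line.toList ++ ['#']) := by
    simp
  rw [hsplit, PySem.List.enumerate_cons, List.foldl_cons]
  have h0 : stepA (PySem.Str.len line) (PySem.Dict.empty, 0, none, 0) (0, '#')
      = (PySem.Dict.empty, 0, some 0, 0) := by
    simp [stepA]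
  rw [h0]
  have := loop_eq (PySem.Str.len line) line.toList (0 + 1) 0 0 0 0 0 PySem.Dict.empty
    le_rfl (by omega) (by rw [show (PySem.Str.len line) - 0 - 0 = PySem.Str.len line - 0 by ring, segsum_self, add_zero])
  simpa using this
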